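-- pv_equiv track=rewrite | github.com/DeepRank/deeprank | deeprank/generate/DataGenerator.py | _tunable_kernel
-- ===== SOURCE A (Python) =====
-- def _tunable_kernel(kernel):  # pragma: no cover
--     """Make a tunale kernel.
--
--     Args:
--         kernel (str): String of the kernel
--
--     Returns:
--         TYPE: tunable kernel
--     """
--     switch_name = {
--         'blockDim.x': 'block_size_x',
--         'blockDim.y': 'block_size_y',
--         'blockDim.z': 'block_size_z'}
--     for old, new in switch_name.items():
--         kernel = kernel.replace(old, new)
--     return kernel
-- ===== SOURCE B (Python) =====
-- def _tunable_kernel(kernel):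
--     """Single left-to-right scan: replace each blockDim.{x,y,z} occurrence in one pass."""
--     out = []
--     i = 0
--     n = len(kernel)
--     while i < n:
--         if kernel.startswith('blockDim.x', i):
--             out.append('block_size_x')
--             i += 10
--         elif kernel.startswith('blockDim.y', i):
--             out.append('block_size_y')
--             i += 10
--         elif kernel.startswith('blockDim.z', i):
--             out.append('block_size_z')
--             i += 10
--         else:
--             out.append(kernel[i])
--             i += 1
--     return ''.join(out)
-- ===== Notes on version B (the rewrite author's own statement) =====
-- stated objective: alternative
-- what changed: Three sequential whole-string str.replace passes are replaced by a single left-to-right scan that matches the three patterns in one traversal and joins the pieces.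
import Mathlib
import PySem

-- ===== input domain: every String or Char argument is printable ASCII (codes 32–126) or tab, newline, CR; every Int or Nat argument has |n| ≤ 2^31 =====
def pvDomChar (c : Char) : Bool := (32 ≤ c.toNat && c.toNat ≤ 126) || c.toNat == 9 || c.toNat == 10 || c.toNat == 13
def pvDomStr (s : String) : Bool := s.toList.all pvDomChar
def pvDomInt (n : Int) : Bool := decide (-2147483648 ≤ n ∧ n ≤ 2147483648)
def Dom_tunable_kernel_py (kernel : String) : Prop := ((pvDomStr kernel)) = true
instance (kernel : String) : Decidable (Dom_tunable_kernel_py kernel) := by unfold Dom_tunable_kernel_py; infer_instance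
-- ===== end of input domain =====

-- B replaces the three sequential str.replace passes by a single left-to-right scan (alternative decomposition, same cost).

-- ===== PORT A =====
def tunable_kernel_py (kernel : String) : String :=
  let switch_name : PySem.Dict String String :=
    PySem.Dict.ofList
      [("blockDim.x", "block_size_x"), ("blockDim.y", "block_size_y"), ("blockDim.z", "block_size_z")]
  switch_name.items.foldl (fun kernel on => PySem.Str.replace kernel on.1 on.2) kernel

-- ===== PORT B =====
-- single scan over the characters: at each position try the three patterns, else copy one char
def bScan : List Char → List Char
  | [] => []
  | c :: t =>
    if "blockDim.x".toList.isPrefixOf (c :: t) then "block_size_x".toList ++ bScan (t.drop 9)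
    else if "blockDim.y".toList.isPrefixOf (c :: t) then "block_size_y".toList ++ bScan (t.drop 9)
    else if "blockDim.z".toList.isPrefixOf (c :: t) then "block_size_z".toList ++ bScan (t.drop 9)
    else c :: bScan t
termination_by l => l.length
decreasing_by all_goals simp

def tunable_kernel_py_alt (kernel : String) : String := String.ofList (bScan kernel.toList)

-- ===== PRECONDITION & SPEC =====
def Spec_tunable_kernel_py (kernel : String) (out : String) : Prop := out = tunable_kernel_py_alt kernel
instance (kernel : String) (out : String) : Decidable (Spec_tunable_kernel_py kernel out) := by unfold Spec_tunable_kernel_py; infer_instance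

-- ===== CLAIM (what is proved, stated in full; the proofs are below) =====
def Claim_equal_tunable_kernel_py : Prop := ∀ (kernel : String), Dom_tunable_kernel_py kernel → Spec_tunable_kernel_py kernel (tunable_kernel_py kernel)

-- ===== LEMMAS AND PROOFS =====

-- one pass of Python's s.replace(p, n) for a nonempty pattern p, as structural recursion
def rep (p n : List Char) : List Char → List Char
  | [] => []
  | c :: t =>
    if p.isPrefixOf (c :: t) then n ++ rep p n (t.drop (p.length - 1)) else c :: rep p n t
termination_by l => l.length
decreasing_by all_goals simp

theorem rep_cons_not (p n : List Char) (c : Char) (t : List Char) (h : ¬ p <+: c :: t) :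
    rep p n (c :: t) = c :: rep p n t := by
  rw [rep, if_neg (by simpa [List.isPrefixOf_iff_prefix] using h)]

theorem rep_self (p n : List Char) (hp : p ≠ []) (u : List Char) :
    rep p n (p ++ u) = n ++ rep p n u := by
  cases p with
  | nil => exact absurd rfl hp
  | cons c pt =>
    rw [List.cons_append, rep, if_pos (List.isPrefixOf_iff_prefix.mpr ⟨u, by simp⟩)]
    simp

theorem rep_go (p n : List Char) (hp : p ≠ []) :
    ∀ fuel (l acc : List Char), l.length ≤ fuel →
      PySem.Chars.replace.go p n fuel l acc = acc.reverse ++ rep p n l := by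
  intro fuel
  induction fuel with
  | zero =>
    intro l acc h
    have : l = [] := by cases l <;> simp_all
    subst this
    simp [PySem.Chars.replace.go, rep]
  | succ f ih =>
    intro l acc h
    cases l with
    | nil => simp [PySem.Chars.replace.go, rep]
    | cons c t =>
      have hlen : 1 ≤ p.length := by cases p <;> simp_all
      rw [rep]
      by_cases hpre : p.isPrefixOf (c :: t)
      · have hd : (c :: t).drop p.length = t.drop (p.length - 1) := by
          conv_lhs => rw [show p.length = (p.length - 1) + 1 by omega]
          simp
        simp only [PySem.Chars.replace.go, hpre, if_pos]
        rw [ih ((c :: t).drop p.length) (n.reverse ++ acc) (by simp at h ⊢; omega), hd]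
        simp
      · simp only [PySem.Chars.replace.go, hpre]
        rw [ih t (c :: acc) (by simp at h ⊢; omega)]
        simp

theorem replace_eq_rep (l p n : List Char) (hp : p ≠ []) :
    PySem.Chars.replace l p n = rep p n l := by
  unfold PySem.Chars.replace
  rw [if_neg (by simpa using hp)]
  simpa using rep_go p n hp l.length l [] le_rfl

-- a prefix of a ++ u agrees with a on their overlap
theorem pref_cross (p a u : List Char) (h : p <+: a ++ u) :
    p.take a.length = a.take p.length := by
  obtain ⟨r, hr⟩ := h
  have hp : p = (a ++ u).take p.length := by
    rw [← hr, List.take_left]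
  calc p.take a.length = ((a ++ u).take p.length).take a.length := by rw [← hp]
    _ = (a ++ u).take (min a.length p.length) := by rw [List.take_take]
    _ = ((a ++ u).take a.length).take p.length := by rw [List.take_take, Nat.min_comm]
    _ = a.take p.length := by rw [List.take_left]

-- when p matches at no position inside a (whatever follows), rep walks through a unchanged
theorem rep_append (p n a : List Char)
    (H : ∀ i, i < a.length → p.take (a.length - i) ≠ (a.drop i).take p.length) :
    ∀ u, rep p n (a ++ u) = a ++ rep p n u := by
  induction a with
  | nil => intro u; simp
  | cons c a' ih =>
    intro u
    have h0 : ¬ p <+: (c :: a') ++ u := by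
      intro hpre
      have hc := pref_cross p (c :: a') u hpre
      exact H 0 (by simp) (by simpa using hc)
    rw [List.cons_append, rep_cons_not p n c (a' ++ u) (by simpa using h0)]
    rw [ih (fun i hi => by
      have := H (i + 1) (by simp; omega)
      simpa using this) u]
    simp

-- rep with pattern p never creates a new occurrence of (a suffix of) q, provided
-- no suffix of q can start inside the replacement text n
theorem noIntro (p n q : List Char)
    (Hn : ∀ k, k < q.length → (q.drop k).take n.length ≠ n.take (q.length - k)) :
    ∀ l k, k < q.length → ¬ q.drop k <+: l → ¬ q.drop k <+: rep p n l := by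
  intro l
  induction l with
  | nil =>
    intro k hk _ hpre
    rw [show rep p n [] = [] from by rw [rep]] at hpre
    have := List.prefix_nil.mp hpre
    rw [List.drop_eq_nil_iff] at this
    omega
  | cons c t ih =>
    intro k hk hnot hpre
    by_cases hp : p.isPrefixOf (c :: t)
    · rw [rep, if_pos hp] at hpre
      have hc := pref_cross _ _ _ hpre
      rw [List.length_drop] at hc
      exact Hn k hk hc
    · rw [rep_cons_not p n c t (by simpa [List.isPrefixOf_iff_prefix] using hp)] at hpre
      have hdk : q.drop k = q[k] :: q.drop (k + 1) := List.drop_eq_getElem_cons hk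
      rw [hdk, List.cons_prefix_cons] at hpre
      obtain ⟨hc, hrest⟩ := hpre
      by_cases hk1 : k + 1 < q.length
      · have hnt : ¬ q.drop (k + 1) <+: t := by
          intro h'
          exact hnot (by rw [hdk, hc]; exact List.cons_prefix_cons.mpr ⟨rfl, h'⟩)
        exact ih (k + 1) hk1 hnt hrest
      · have hek : q.drop (k + 1) = [] := by rw [List.drop_eq_nil_iff]; omega
        exact hnot (by rw [hdk, hek, hc]; exact List.cons_prefix_cons.mpr ⟨rfl, List.nil_prefix⟩)

-- the three sequential passes equal the single fused scan
theorem chain_eq_bScan (l : List Char) :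
    rep "blockDim.z".toList "block_size_z".toList
      (rep "blockDim.y".toList "block_size_y".toList
        (rep "blockDim.x".toList "block_size_x".toList l)) = bScan l := by
  induction l using bScan.induct with
  | case1 =>
    rw [show ∀ p n : List Char, rep p n [] = [] from fun p n => by rw [rep], bScan]
    rw [show ∀ p n : List Char, rep p n [] = [] from fun p n => by rw [rep]]
    rw [show ∀ p n : List Char, rep p n [] = [] from fun p n => by rw [rep]]
  | case2 c t h1 ih =>
    have hl : c :: t = "blockDim.x".toList ++ t.drop 9 := by
      obtain ⟨r, hr⟩ := List.isPrefixOf_iff_prefix.mp h1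
      have : t.drop 9 = r := by
        have := congrArg (List.drop 10) hr
        simpa [List.drop_left] using this.symm
      rw [this, hr]
    rw [bScan, if_pos h1, hl, rep_self _ _ (by decide)]
    rw [rep_append "blockDim.y".toList "block_size_y".toList "block_size_x".toList (by decide)]
    rw [rep_append "blockDim.z".toList "block_size_z".toList "block_size_x".toList (by decide)]
    rw [ih]
  | case3 c t h1 h2 ih =>
    have hl : c :: t = "blockDim.y".toList ++ t.drop 9 := by
      obtain ⟨r, hr⟩ := List.isPrefixOf_iff_prefix.mp h2
      have : t.drop 9 = r := by
        have := congrArg (List.drop 10) hr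
        simpa [List.drop_left] using this.symm
      rw [this, hr]
    rw [bScan, if_neg h1, if_pos h2, hl]
    rw [rep_append "blockDim.x".toList "block_size_x".toList "blockDim.y".toList (by decide)]
    rw [rep_self _ _ (by decide)]
    rw [rep_append "blockDim.z".toList "block_size_z".toList "block_size_y".toList (by decide)]
    rw [ih]
  | case4 c t h1 h2 h3 ih =>
    have hl : c :: t = "blockDim.z".toList ++ t.drop 9 := by
      obtain ⟨r, hr⟩ := List.isPrefixOf_iff_prefix.mp h3
      have : t.drop 9 = r := by
        have := congrArg (List.drop 10) hr
        simpa [List.drop_left] using this.symm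
      rw [this, hr]
    rw [bScan, if_neg h1, if_neg h2, if_pos h3, hl]
    rw [rep_append "blockDim.x".toList "block_size_x".toList "blockDim.z".toList (by decide)]
    rw [rep_append "blockDim.y".toList "block_size_y".toList "blockDim.z".toList (by decide)]
    rw [rep_self _ _ (by decide)]
    rw [ih]
  | case5 c t h1 h2 h3 ih =>
    have hox : ¬ "blockDim.x".toList <+: c :: t := by simpa [List.isPrefixOf_iff_prefix] using h1
    have hoy : ¬ "blockDim.y".toList <+: c :: t := by simpa [List.isPrefixOf_iff_prefix] using h2
    have hoz : ¬ "blockDim.z".toList <+: c :: t := by simpa [List.isPrefixOf_iff_prefix] using h3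
    have e1 : rep "blockDim.x".toList "block_size_x".toList (c :: t)
        = c :: rep "blockDim.x".toList "block_size_x".toList t := rep_cons_not _ _ _ _ hox
    have hoy' : ¬ "blockDim.y".toList <+: c :: rep "blockDim.x".toList "block_size_x".toList t := by
      rw [← e1]
      have := noIntro "blockDim.x".toList "block_size_x".toList "blockDim.y".toList (by decide)
        (c :: t) 0 (by decide) (by simp only [List.drop_zero]; exact hoy)
      simp only [List.drop_zero] at this
      exact this
    have e2 : rep "blockDim.y".toList "block_size_y".toList
        (c :: rep "blockDim.x".toList "block_size_x".toList t)
        = c :: rep "blockDim.y".toList "block_size_y".toList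
            (rep "blockDim.x".toList "block_size_x".toList t) := rep_cons_not _ _ _ _ hoy'
    have hoz' : ¬ "blockDim.z".toList <+: c :: rep "blockDim.y".toList "block_size_y".toList
        (rep "blockDim.x".toList "block_size_x".toList t) := by
      rw [← e2, ← e1]
      have s1 := noIntro "blockDim.x".toList "block_size_x".toList "blockDim.z".toList (by decide)
        (c :: t) 0 (by decide) (by simp only [List.drop_zero]; exact hoz)
      simp only [List.drop_zero] at s1
      have s2 := noIntro "blockDim.y".toList "block_size_y".toList "blockDim.z".toList (by decide)
        (rep "blockDim.x".toList "block_size_x".toList (c :: t)) 0 (by decide)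
        (by simp only [List.drop_zero]; exact s1)
      simp only [List.drop_zero] at s2
      exact s2
    rw [bScan, if_neg h1, if_neg h2, if_neg h3, e1, e2, rep_cons_not _ _ _ _ hoz', ih]

theorem portA_unfold (kernel : String) :
    tunable_kernel_py kernel =
      PySem.Str.replace (PySem.Str.replace (PySem.Str.replace kernel "blockDim.x" "block_size_x")
        "blockDim.y" "block_size_y") "blockDim.z" "block_size_z" := rfl

-- ===== VERDICT (by name: the statement is the Claim_ definition above) =====
theorem tunable_kernel_py_spec : Claim_equal_tunable_kernel_py := by
  intro kernel _
  unfold Spec_tunable_kernel_py tunable_kernel_py_alt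
  rw [portA_unfold]
  simp only [PySem.Str.replace, String.toList_ofList]
  rw [replace_eq_rep _ _ _ (by decide), replace_eq_rep _ _ _ (by decide),
    replace_eq_rep _ _ _ (by decide), chain_eq_bScan]
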